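-- pv_equiv track=rewrite | github.com/calico-team/calico-fa22 | toki/solutions/toki_simplified.py | solve
-- ===== SOURCE A (Python) =====
-- vowels = 'aeiou'
--
-- consonants = 'mnptkswjl'
--
-- illegal = ['wu', 'wo', 'ji', 'ti', 'nn', 'nm']
--
-- def solve(W: str) -> str:
--     answer = 'pona'
--
--     # starts with 'n' edge case
--     if W[0] == 'n':
--         if len(W) > 1:
--             if W[1] not in vowels:
--                 answer = 'ike'
--         else:
--             answer = 'ike'
--
--     for x in range(len(W)):
--         # checks for illegal letters
--         if W[x] not in vowels and W[x] not in consonants: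
--             answer = 'ike'
--
--         # W[x] + W[x+1] (if it exists)
--         a = W[x:x + 2]
--         if len(a) == 1:
--             # ends in non-n consonant edge case
--             if a[0] in consonants and a[0] != 'n':
--                 answer = 'ike'
--         # illegal sequences
--         elif a in illegal:
--             answer = 'ike'
--             break
--         # adjacent vowels
--         elif a[0] in vowels and a[1] in vowels:
--             answer = 'ike'
--             break
--         # adjacent consonants (where first is not n)
--         elif a[0] in consonants and a[0] != 'n' and a[1] in consonants:
--             answer = 'ike'
--             break
--
--     return answer
-- ===== SOURCE B (Python) =====
-- # B: a 7-state finite automaton run once over the word; the transition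
-- # function encodes every phonotactic rule, accepting iff the final state
-- # follows a vowel or an internal 'n'.
--
-- def _cls(ch):
--     # state for a consonant just read (internally)
--     return 'n' if ch == 'n' else 'w' if ch == 'w' else 'jt' if ch in 'jt' else 'c'
--
-- def _step(state, ch):
--     if ch in 'aeiou':
--         if state == 'v' or (state == 'w' and ch in 'uo') or (state == 'jt' and ch == 'i'):
--             return None
--         return 'v'
--     if ch in 'mnptkswjl':
--         if state == 'start':
--             return 'initn' if ch == 'n' else _cls(ch)
--         if state == 'v':
--             return _cls(ch)
--         if state == 'n' and ch not in 'nm':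
--             return _cls(ch)
--         return None
--     return None
--
-- def solve(W: str) -> str:
--     state = 'start'
--     for ch in W:
--         state = _step(state, ch)
--         if state is None:
--             return 'ike'
--     return 'pona' if state in ('v', 'n') else 'ike'
-- ===== Notes on version B (the rewrite author's own statement) =====
-- stated objective: alternative
-- what changed: Replaced A's rule-by-rule scan (first-char check, per-letter check, slice-based bigram checks with break) by a 7-state finite automaton: one transition function over (state, letter) encodes all phonotactic rules, run once left-to-right, accepting iff the final state is after-vowel or after-internal-n.
import Mathlib
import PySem

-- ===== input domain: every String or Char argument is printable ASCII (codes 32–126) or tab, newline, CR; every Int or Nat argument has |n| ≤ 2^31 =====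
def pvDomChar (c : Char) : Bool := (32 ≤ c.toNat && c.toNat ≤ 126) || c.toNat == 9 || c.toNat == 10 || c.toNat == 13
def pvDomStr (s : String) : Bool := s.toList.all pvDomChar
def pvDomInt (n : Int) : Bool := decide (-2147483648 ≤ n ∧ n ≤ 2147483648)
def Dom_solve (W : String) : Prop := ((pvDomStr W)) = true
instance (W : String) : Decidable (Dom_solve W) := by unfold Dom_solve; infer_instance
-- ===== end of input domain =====

-- B replaces A's rule-by-rule scan by a 7-state finite automaton run once over the word; return value only.

-- ===== PORT A =====
def vowelsP : List Char := ['a', 'e', 'i', 'o', 'u']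
def consP : List Char := ['m', 'n', 'p', 't', 'k', 's', 'w', 'j', 'l']
def illegalP : List (List Char) := [['w','u'], ['w','o'], ['j','i'], ['t','i'], ['n','n'], ['n','m']]

-- A's initial answer: the "starts with 'n'" edge case (if/else chain as in the Python)
def startAns (c0 : Char) (rest : List Char) : String :=
  if c0 = 'n' then
    match rest with
    | [] => "ike"                                            -- len(W) = 1
    | c1 :: _ => if ¬ c1 ∈ vowelsP then "ike" else "pona"    -- W[1] not in vowels
  else "pona"

-- A's 'for x in range(len(W))' loop: recursion on the suffix W[x:]; 'a = W[x:x+2]' is the first ≤2 chars of it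
def solveLoop : List Char → String → String
  | [], answer => answer
  | [c], answer =>
      let answer1 := if ¬ c ∈ vowelsP ∧ ¬ c ∈ consP then "ike" else answer
      if c ∈ consP ∧ c ≠ 'n' then "ike" else answer1
  | c :: d :: rest, answer =>
      let answer1 := if ¬ c ∈ vowelsP ∧ ¬ c ∈ consP then "ike" else answer
      if [c, d] ∈ illegalP then "ike"                        -- break
      else if c ∈ vowelsP ∧ d ∈ vowelsP then "ike"           -- break
      else if c ∈ consP ∧ c ≠ 'n' ∧ d ∈ consP then "ike"     -- break
      else solveLoop (d :: rest) answer1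

def solve (W : String) : String :=
  match W.toList with
  | [] => "ike"   -- Python raises IndexError on W[0]; outside Pre_solve
  | c0 :: rest => solveLoop (c0 :: rest) (startAns c0 rest)

-- ===== PORT B =====
-- automaton states: start, initial 'n', after-vowel, after internal 'n', after 'w', after 'j'/'t', after other consonant
inductive St where
  | start | initn | v | n | w | jt | c
deriving DecidableEq, Repr

-- B's _cls
def clsB (ch : Char) : St :=
  if ch = 'n' then .n else if ch = 'w' then .w else if ch = 'j' ∨ ch = 't' then .jt else .c

-- B's _step (None = Option.none)
def stepB (s : St) (ch : Char) : Option St :=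
  if ch ∈ vowelsP then
    if s = .v ∨ (s = .w ∧ (ch = 'u' ∨ ch = 'o')) ∨ (s = .jt ∧ ch = 'i') then none
    else some .v
  else if ch ∈ consP then
    if s = .start then some (if ch = 'n' then .initn else clsB ch)
    else if s = .v then some (clsB ch)
    else if s = .n ∧ ¬ (ch = 'n' ∨ ch = 'm') then some (clsB ch)
    else none
  else none

-- B's for-loop with early return
def runB : St → List Char → String
  | s, [] => if s = .v ∨ s = .n then "pona" else "ike"
  | s, ch :: rest =>
      match stepB s ch with
      | none => "ike"
      | some s' => runB s' rest

def solve_alt (W : String) : String := runB .start W.toList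

-- ===== PRECONDITION & SPEC =====
-- Pre_ excludes only the empty string, on which A raises IndexError at W[0]
def Pre_solve (W : String) : Prop := W ≠ ""
instance (W : String) : Decidable (Pre_solve W) := by unfold Pre_solve; infer_instance
def pvWitness_solve : String := "toki"

def Spec_solve (W : String) (out : String) : Prop := out = solve_alt W
instance (W : String) (out : String) : Decidable (Spec_solve W out) := by unfold Spec_solve; infer_instance

-- ===== CLAIM (what is proved, stated in full; the proofs are below) =====
def Claim_equal_solve : Prop := ∀ (W : String), Dom_solve W → Pre_solve W → Spec_solve W (solve W)

-- ===== LEMMAS AND PROOFS =====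

def letterBad (c : Char) : Bool := ¬ c ∈ vowelsP ∧ ¬ c ∈ consP
def pairBad (c d : Char) : Bool :=
  decide ([c, d] ∈ illegalP) || (decide (c ∈ vowelsP) && decide (d ∈ vowelsP))
    || (decide (c ∈ consP) && decide (c ≠ 'n') && decide (d ∈ consP))

-- the set of violations A's loop detects on a suffix
def viol : List Char → Bool
  | [] => false
  | [c] => letterBad c || (decide (c ∈ consP) && decide (c ≠ 'n'))
  | c :: d :: rest => letterBad c || pairBad c d || viol (d :: rest)

theorem startAns_cases (c0 : Char) (rest : List Char) :
    startAns c0 rest = "pona" ∨ startAns c0 rest = "ike" := by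
  cases rest <;> simp only [startAns] <;> split_ifs <;> simp

set_option maxHeartbeats 2000000 in
theorem solveLoop_eq : ∀ (L : List Char), L ≠ [] → ∀ (answer : String),
    answer = "pona" ∨ answer = "ike" →
    solveLoop L answer = if answer = "ike" ∨ viol L then "ike" else "pona" := by
  intro L
  induction L with
  | nil => intro h; exact absurd rfl h
  | cons c t ih =>
    intro _ answer hans
    match t with
    | [] =>
      simp only [solveLoop, viol, letterBad]
      rcases hans with ha | ha <;> subst ha <;>
        split_ifs <;> first | rfl | tauto | (simp_all <;> tauto)
    | d :: rest =>
      simp only [solveLoop, viol]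
      have h1' : (if ¬ c ∈ vowelsP ∧ ¬ c ∈ consP then "ike" else answer) = "pona" ∨
          (if ¬ c ∈ vowelsP ∧ ¬ c ∈ consP then "ike" else answer) = "ike" := by
        split_ifs
        · exact Or.inr rfl
        · exact hans
      rw [ih (by simp) _ h1']
      rcases hans with ha | ha <;> subst ha <;>
        simp only [pairBad, letterBad] <;>
          split_ifs <;> first | rfl | tauto | (simp_all <;> tauto)

-- the automaton state after a valid non-initial letter
def stOf (p : Char) : St := if p ∈ vowelsP then .v else clsB p

theorem letterBad_false (d : Char) (h : letterBad d = false) : d ∈ vowelsP ∨ d ∈ consP := by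
  simp only [letterBad, decide_eq_false_iff_not, not_and_or, not_not] at h
  exact h

theorem viol_head_bad (d : Char) (rest : List Char) (h : letterBad d = true) :
    viol (d :: rest) = true := by
  cases rest <;> simp [viol, h]

theorem stepB_valid (p d : Char) (hp : p ∈ vowelsP ∨ p ∈ consP) :
    stepB (stOf p) d = if letterBad d || pairBad p d then none else some (stOf d) := by
  by_cases hv : d ∈ vowelsP
  · rcases hp with h | h <;> fin_cases h <;> fin_cases hv <;> decide
  · by_cases hc : d ∈ consP
    · rcases hp with h | h <;> fin_cases h <;> fin_cases hc <;> decide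
    · have hb : letterBad d = true := by simp [letterBad, hv, hc]
      simp [stepB, hv, hc, hb]

theorem runB_valid : ∀ (L : List Char) (p : Char), p ∈ vowelsP ∨ p ∈ consP →
    runB (stOf p) L = if viol (p :: L) then "ike" else "pona" := by
  intro L
  induction L with
  | nil =>
    intro p hp
    rcases hp with h | h <;> fin_cases h <;> decide
  | cons d rest ih =>
    intro p hp
    have hlp : letterBad p = false := by
      rcases hp with h | h <;> simp [letterBad, h]
    simp only [runB, stepB_valid p d hp]
    cases hld : letterBad d with
    | true =>
      simp [viol, hlp, viol_head_bad d rest hld]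
    | false =>
      cases hpb : pairBad p d with
      | true => simp [viol, hpb, hlp]
      | false =>
        simp only [Bool.or_self, Bool.false_eq_true, if_false]
        rw [ih d (letterBad_false d hld)]
        simp [viol, hlp, hpb]

theorem runB_initn : ∀ (rest : List Char),
    runB .initn rest =
      (match rest with
       | [] => "ike"
       | d :: r => if d ∈ vowelsP then runB St.v r else "ike") := by
  intro rest
  cases rest with
  | nil => decide
  | cons d r =>
    by_cases hv : d ∈ vowelsP
    · fin_cases hv <;> simp [runB, stepB] <;> rfl
    · by_cases hc : d ∈ consP
      · fin_cases hc <;> simp [runB, stepB, hv]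
      · simp [runB, stepB, hv, hc]

-- ===== VERDICT (by name: the statement is the Claim_ definition above) =====
theorem solve_spec : Claim_equal_solve := by
  intro W _ hpre
  unfold Spec_solve solve solve_alt
  have hW : W.toList ≠ [] := by
    intro h
    apply hpre
    have := String.toList_inj (s₁ := W) (s₂ := "")
    simp_all
  match hL : W.toList with
  | [] => exact absurd hL hW
  | c0 :: rest =>
    simp only []
    rw [solveLoop_eq _ (by simp) _ (startAns_cases c0 rest)]
    by_cases hv0 : c0 ∈ vowelsP
    · -- first letter a vowel: start rule silent, automaton goes to .v = stOf c0
      have hstep : stepB .start c0 = some (stOf c0) := by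
        fin_cases hv0 <;> decide
      have hsa : startAns c0 rest = "pona" := by
        fin_cases hv0 <;> simp [startAns]
      simp only [runB, hstep, runB_valid rest c0 (Or.inl hv0), hsa]
      simp
    · by_cases hc0 : c0 ∈ consP
      · by_cases hn : c0 = 'n'
        · -- first letter 'n': automaton in .initn
          subst hn
          have hstep : stepB .start 'n' = some .initn := by decide
          simp only [runB, hstep, runB_initn]
          cases rest with
          | nil => simp [startAns, viol, letterBad]
          | cons c1 r =>
            by_cases hv1 : c1 ∈ vowelsP
            · have h1 : runB St.v r = runB (stOf c1) r := by
                have : stOf c1 = St.v := by simp [stOf, hv1]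
                rw [this]
              simp only [hv1, if_pos, h1, runB_valid r c1 (Or.inl hv1)]
              have hsa : startAns 'n' (c1 :: r) = "pona" := by simp [startAns, hv1]
              have hpb : pairBad 'n' c1 = false := by
                fin_cases hv1 <;> decide
              simp [hsa, viol, letterBad, hpb, vowelsP, consP]
            · have hsa : startAns 'n' (c1 :: r) = "ike" := by simp [startAns, hv1]
              simp [hsa, hv1]
        · -- first letter a non-n consonant
          have hstep : stepB .start c0 = some (stOf c0) := by
            fin_cases hc0 <;> first | (exact absurd rfl hn) | decide
          have hsa : startAns c0 rest = "pona" := by simp [startAns, hn]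
          simp only [runB, hstep, runB_valid rest c0 (Or.inr hc0), hsa]
          simp
      · -- first letter invalid: both sides "ike"
        have hb : letterBad c0 = true := by simp [letterBad, hv0, hc0]
        have hstep : stepB .start c0 = none := by simp [stepB, hv0, hc0]
        rcases startAns_cases c0 rest with h | h <;>
          simp [runB, hstep, viol_head_bad c0 rest hb, h]
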